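-- pv_equiv track=rewrite | github.com/amshrestha2020/CodeSignal | CodeSignal/Graphs/EfficientRoadNetwork.py | solution
-- ===== SOURCE A (Python) =====
-- def solution(n, roads):
--     # Create an adjacency list to represent the graph
--     adjacency_list = [[] for _ in range(n)]
--
--     # Populate the adjacency list
--     for road in roads:
--         start, end = road
--         adjacency_list[start].append(end)
--         adjacency_list[end].append(start)
--
--     # Check if every city can be reached within two hops
--     for city in range(n - 1):
--         # Cities reachable in one hop
--         one_hop_cities = {connected_city for connected_city in adjacency_list[city]}
--
--         # Cities reachable in two hops
--         two_hop_cities = {connected_city for intermediate_city in one_hop_cities for connected_city in adjacency_list[intermediate_city]}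
--
--         # If there exists a city that is not reachable within two hops, return False
--         if len({city} | one_hop_cities | two_hop_cities) < n:
--             return False
--
--     # If every city is reachable within two hops, return True
--     return True
-- ===== SOURCE B (Python) =====
-- def solution(n, roads):
--     adj = [set() for _ in range(n)]
--     for a, b in roads:
--         adj[a].add(b)
--         adj[b].add(a)
--     for u in range(n):
--         for v in range(u + 1, n):
--             if v not in adj[u] and adj[u].isdisjoint(adj[v]):
--                 return False
--     return True
-- ===== Notes on version B (the rewrite author's own statement) =====
-- stated objective: alternative
-- what changed: Replaces A's per-city construction of the two-hop reachable set (and a cardinality test against n) with set adjacency built once and a direct test on each unordered pair u<v: adjacent or sharing a neighbor, relying on the symmetry of the within-two-hops relation.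
-- outside the precondition, e.g. on solution(2, [[0, -1]]): A returns True, B returns False
import Mathlib
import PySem

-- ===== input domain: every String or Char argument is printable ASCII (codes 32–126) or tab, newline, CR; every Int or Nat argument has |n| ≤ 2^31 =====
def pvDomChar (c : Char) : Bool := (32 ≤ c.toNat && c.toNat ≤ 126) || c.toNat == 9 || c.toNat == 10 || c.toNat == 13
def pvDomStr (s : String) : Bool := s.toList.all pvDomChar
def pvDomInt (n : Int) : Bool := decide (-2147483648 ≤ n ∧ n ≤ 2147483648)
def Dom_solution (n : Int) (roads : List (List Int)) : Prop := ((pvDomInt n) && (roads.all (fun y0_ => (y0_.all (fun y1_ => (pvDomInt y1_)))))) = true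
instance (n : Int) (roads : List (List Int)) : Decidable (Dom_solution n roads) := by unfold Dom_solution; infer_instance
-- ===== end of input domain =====

-- B replaces A's per-city two-hop reachable-set construction by a direct test of every
-- unordered pair (adjacent, or sharing a neighbour); equivalence rests on the symmetry of
-- the within-two-hops relation (which also justifies A's range(n-1) loop bound).

-- ===== PORT A =====
-- loop body of 'for road in roads': start, end = road; adjacency_list[start].append(end); adjacency_list[end].append(start)
def stepA (adj : List (List Int)) (road : List Int) : List (List Int) :=
  match road with
  | [s, e] =>
      let adj1 := PySem.List.pySetD adj s (PySem.List.pyGetD adj s [] ++ [e])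
      PySem.List.pySetD adj1 e (PySem.List.pyGetD adj1 e [] ++ [s])
  | _ => adj   -- Python raises ValueError here (wrong arity road); outside Pre_

def buildAdjA (n : Int) (roads : List (List Int)) : List (List Int) :=
  roads.foldl stepA ((PySem.List.pyRange 0 n 1).map (fun _ => ([] : List Int)))

-- body of 'for city in range(n - 1)': the two set comprehensions and the union-length test
def twoHopCheckA (n : Int) (adj : List (List Int)) (city : Int) : Bool :=
  let oneHop : PySem.Set Int := PySem.Set.ofList (PySem.List.pyGetD adj city [])
  let twoHop : PySem.Set Int :=
    PySem.Set.ofList (oneHop.flatMap (fun w => PySem.List.pyGetD adj w []))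
  !(decide (PySem.Set.len
      (PySem.Set.union (PySem.Set.union (PySem.Set.ofList [city]) oneHop) twoHop) < n))

def solution (n : Int) (roads : List (List Int)) : Bool :=
  let adjacencyList := buildAdjA n roads
  (PySem.List.pyRange 0 (n-1) 1).all (fun city => twoHopCheckA n adjacencyList city)

-- ===== PORT B =====
-- loop body of 'for a, b in roads': adj[a].add(b); adj[b].add(a)
def stepB (adj : List (PySem.Set Int)) (road : List Int) : List (PySem.Set Int) :=
  match road with
  | [a, b] =>
      let adj1 := PySem.List.pySetD adj a (PySem.Set.add (PySem.List.pyGetD adj a PySem.Set.empty) b)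
      PySem.List.pySetD adj1 b (PySem.Set.add (PySem.List.pyGetD adj1 b PySem.Set.empty) a)
  | _ => adj   -- Python raises ValueError here (wrong arity road); outside Pre_

def buildAdjB (n : Int) (roads : List (List Int)) : List (PySem.Set Int) :=
  roads.foldl stepB ((PySem.List.pyRange 0 n 1).map (fun _ => (PySem.Set.empty : PySem.Set Int)))

def solution_alt (n : Int) (roads : List (List Int)) : Bool :=
  let adj := buildAdjB n roads
  (PySem.List.pyRange 0 n 1).all (fun u =>
    (PySem.List.pyRange (u+1) n 1).all (fun v =>
      PySem.Set.contains (PySem.List.pyGetD adj u PySem.Set.empty) v ||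
      !(PySem.Set.isdisjoint (PySem.List.pyGetD adj u PySem.Set.empty)
                             (PySem.List.pyGetD adj v PySem.Set.empty))))

-- ===== PRECONDITION & SPEC =====
-- Pre_ restricts roads to the natural domain: each road is a pair of city indices in [0, n).
-- A raises IndexError/ValueError on wrong-arity or out-of-range roads; on negative endpoints
-- ≥ -n A returns a value only through Python's negative-index wraparound, an accident of its
-- list representation that no caller would specify, so those malformed inputs are excluded too.
def Pre_solution (n : Int) (roads : List (List Int)) : Prop :=
  ∀ r ∈ roads, r.length = 2 ∧ ∀ x ∈ r, 0 ≤ x ∧ x < n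
instance (n : Int) (roads : List (List Int)) : Decidable (Pre_solution n roads) := by
  unfold Pre_solution; infer_instance

def pvWitness_solution : Int × List (List Int) := (3, [[0, 1], [1, 2]])

def Spec_solution (n : Int) (roads : List (List Int)) (out : Bool) : Prop := out = solution_alt n roads
instance (n : Int) (roads : List (List Int)) (out : Bool) : Decidable (Spec_solution n roads out) := by unfold Spec_solution; infer_instance

-- ===== CLAIM (what is proved, stated in full; the proofs are below) =====
def Claim_equal_solution : Prop := ∀ (n : Int) (roads : List (List Int)), Dom_solution n roads → Pre_solution n roads → Spec_solution n roads (solution n roads)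

-- ===== LEMMAS AND PROOFS =====

-- neighbourhood relation read off B's adjacency structure
def Nb (B : List (PySem.Set Int)) (i j : Int) : Prop :=
  j ∈ PySem.List.pyGetD B i PySem.Set.empty

-- the shared invariant of the two adjacency-building folds
def AdjInv (n : Int) (A : List (List Int)) (B : List (PySem.Set Int)) : Prop :=
  A.length = n.toNat ∧ B.length = n.toNat ∧
  (∀ i x : Int, 0 ≤ i → (x ∈ PySem.List.pyGetD A i ([] : List Int) ↔ Nb B i x)) ∧
  (∀ i x : Int, 0 ≤ i → Nb B i x → 0 ≤ x ∧ x < n ∧ i < n) ∧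
  (∀ i j : Int, 0 ≤ i → 0 ≤ j → (Nb B i j ↔ Nb B j i))

lemma pyGetD_set_eq_ite {α : Type} (xs : List α) (k : Int) (v : α) (i : Int) (d : α)
    (hk0 : 0 ≤ k) (hk : k.toNat < xs.length) (hi : 0 ≤ i) :
    PySem.List.pyGetD (xs.set k.toNat v) i d = if i = k then v else PySem.List.pyGetD xs i d := by
  rw [PySem.List.pyGetD_of_nonneg _ _ hi, PySem.List.pyGetD_of_nonneg _ _ hi]
  simp only [List.getD_eq_getElem?_getD, List.getElem?_set]
  by_cases h : i = k
  · subst h; simp [hk]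
  · have : ¬ (i.toNat = k.toNat) := by omega
    simp [h, Ne.symm this]

lemma length_stepA (A : List (List Int)) (r : List Int) : (stepA A r).length = A.length := by
  rcases r with _ | ⟨s, _ | ⟨e, _ | ⟨c, t⟩⟩⟩ <;> simp [stepA, PySem.List.length_pySetD]

lemma length_stepB (B : List (PySem.Set Int)) (r : List Int) : (stepB B r).length = B.length := by
  rcases r with _ | ⟨s, _ | ⟨e, _ | ⟨c, t⟩⟩⟩ <;> simp [stepB, PySem.List.length_pySetD]

lemma mem_stepA (A : List (List Int)) (a b : Int)
    (ha0 : 0 ≤ a) (ha : a.toNat < A.length) (hb0 : 0 ≤ b) (hb : b.toNat < A.length)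
    (i x : Int) (hi : 0 ≤ i) :
    x ∈ PySem.List.pyGetD (stepA A [a, b]) i ([] : List Int) ↔
      x ∈ PySem.List.pyGetD A i ([] : List Int) ∨ (i = a ∧ x = b) ∨ (i = b ∧ x = a) := by
  simp only [stepA]
  rw [PySem.List.pySetD_of_nonneg (i := a) _ _ ha0, PySem.List.pySetD_of_nonneg (i := b) _ _ hb0]
  rw [pyGetD_set_eq_ite _ b _ i _ hb0 (by simpa using hb) hi]
  rw [pyGetD_set_eq_ite _ a _ b _ ha0 ha hb0]
  rw [pyGetD_set_eq_ite _ a _ i _ ha0 ha hi]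
  by_cases hib : i = b <;> by_cases hia : i = a <;> by_cases hba : b = a <;> simp_all

lemma mem_stepB (B : List (PySem.Set Int)) (a b : Int)
    (ha0 : 0 ≤ a) (ha : a.toNat < B.length) (hb0 : 0 ≤ b) (hb : b.toNat < B.length)
    (i x : Int) (hi : 0 ≤ i) :
    x ∈ PySem.List.pyGetD (stepB B [a, b]) i PySem.Set.empty ↔
      x ∈ PySem.List.pyGetD B i PySem.Set.empty ∨ (i = a ∧ x = b) ∨ (i = b ∧ x = a) := by
  simp only [stepB]
  rw [PySem.List.pySetD_of_nonneg (i := a) _ _ ha0, PySem.List.pySetD_of_nonneg (i := b) _ _ hb0]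
  rw [pyGetD_set_eq_ite _ b _ i _ hb0 (by simpa using hb) hi]
  rw [pyGetD_set_eq_ite _ a _ b _ ha0 ha hb0]
  rw [pyGetD_set_eq_ite _ a _ i _ ha0 ha hi]
  by_cases hib : i = b <;> by_cases hia : i = a <;> by_cases hba : b = a <;>
    simp_all [PySem.Set.mem_add]

lemma AdjInv_step (n : Int) (A : List (List Int)) (B : List (PySem.Set Int)) (a b : Int)
    (ha : 0 ≤ a ∧ a < n) (hb : 0 ≤ b ∧ b < n) (h : AdjInv n A B) :
    AdjInv n (stepA A [a, b]) (stepB B [a, b]) := by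
  obtain ⟨hA, hB, hmem, hrange, hsym⟩ := h
  have haA : a.toNat < A.length := by omega
  have hbA : b.toNat < A.length := by omega
  have haB : a.toNat < B.length := by omega
  have hbB : b.toNat < B.length := by omega
  refine ⟨by rw [length_stepA]; exact hA, by rw [length_stepB]; exact hB, ?_, ?_, ?_⟩
  · intro i x hi
    rw [mem_stepA A a b ha.1 haA hb.1 hbA i x hi]
    rw [show Nb (stepB B [a, b]) i x ↔ _ from mem_stepB B a b ha.1 haB hb.1 hbB i x hi]
    exact or_congr_left (hmem i x hi)
  · intro i x hi hx
    rw [show Nb (stepB B [a, b]) i x ↔ _ from mem_stepB B a b ha.1 haB hb.1 hbB i x hi] at hx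
    rcases hx with hx | ⟨hia, hxb⟩ | ⟨hib, hxa⟩
    · exact hrange i x hi hx
    · subst hia; subst hxb; exact ⟨hb.1, hb.2, ha.2⟩
    · subst hib; subst hxa; exact ⟨ha.1, ha.2, hb.2⟩
  · intro i j hi hj
    rw [show Nb (stepB B [a, b]) i j ↔ _ from mem_stepB B a b ha.1 haB hb.1 hbB i j hi]
    rw [show Nb (stepB B [a, b]) j i ↔ _ from mem_stepB B a b ha.1 haB hb.1 hbB j i hj]
    constructor
    · rintro (h' | ⟨h1, h2⟩ | ⟨h1, h2⟩)
      · exact Or.inl ((hsym i j hi hj).mp h')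
      · exact Or.inr (Or.inr ⟨h2, h1⟩)
      · exact Or.inr (Or.inl ⟨h2, h1⟩)
    · rintro (h' | ⟨h1, h2⟩ | ⟨h1, h2⟩)
      · exact Or.inl ((hsym j i hj hi).mp h')
      · exact Or.inr (Or.inr ⟨h2, h1⟩)
      · exact Or.inr (Or.inl ⟨h2, h1⟩)

lemma pyGetD_map_const {α β : Type} (l : List β) (c : α) (i : Int) (hi : 0 ≤ i) :
    PySem.List.pyGetD (l.map (fun _ => c)) i c = c := by
  rw [PySem.List.pyGetD_of_nonneg _ _ hi]
  simp only [List.getD_eq_getElem?_getD, List.getElem?_map]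
  cases l[i.toNat]? <;> simp

lemma AdjInv_foldl (n : Int) (roads : List (List Int))
    (hroads : ∀ r ∈ roads, r.length = 2 ∧ ∀ x ∈ r, 0 ≤ x ∧ x < n) :
    ∀ (A : List (List Int)) (B : List (PySem.Set Int)), AdjInv n A B →
      AdjInv n (roads.foldl stepA A) (roads.foldl stepB B) := by
  induction roads with
  | nil => intro A B h; exact h
  | cons r t ih =>
      intro A B h
      obtain ⟨hlen, hx⟩ := hroads r (List.mem_cons_self)
      rcases r with _ | ⟨a, _ | ⟨b, _ | ⟨c, t'⟩⟩⟩ <;> simp at hlen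
      have ha := hx a (by simp)
      have hb := hx b (by simp)
      simp only [List.foldl_cons]
      exact ih (fun r' hr' => hroads r' (List.mem_cons_of_mem _ hr')) _ _
        (AdjInv_step n A B a b ha hb h)

lemma AdjInv_build (n : Int) (roads : List (List Int)) (hpre : Pre_solution n roads) :
    AdjInv n (buildAdjA n roads) (buildAdjB n roads) := by
  apply AdjInv_foldl n roads hpre
  refine ⟨by simp [PySem.List.length_pyRange_one], by simp [PySem.List.length_pyRange_one], ?_, ?_, ?_⟩
  · intro i x hi
    rw [pyGetD_map_const _ ([] : List Int) i hi]
    rw [show Nb ((PySem.List.pyRange 0 n 1).map (fun _ => (PySem.Set.empty : PySem.Set Int))) i x ↔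
          x ∈ PySem.List.pyGetD ((PySem.List.pyRange 0 n 1).map (fun _ => (PySem.Set.empty : PySem.Set Int))) i PySem.Set.empty from Iff.rfl]
    rw [pyGetD_map_const _ (PySem.Set.empty : PySem.Set Int) i hi]
    simp [PySem.Set.empty]
  · intro i x hi hx
    rw [show Nb ((PySem.List.pyRange 0 n 1).map (fun _ => (PySem.Set.empty : PySem.Set Int))) i x ↔
          x ∈ PySem.List.pyGetD ((PySem.List.pyRange 0 n 1).map (fun _ => (PySem.Set.empty : PySem.Set Int))) i PySem.Set.empty from Iff.rfl] at hx
    rw [pyGetD_map_const _ (PySem.Set.empty : PySem.Set Int) i hi] at hx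
    simp [PySem.Set.empty] at hx
  · intro i j hi hj
    unfold Nb
    rw [pyGetD_map_const _ (PySem.Set.empty : PySem.Set Int) i hi,
        pyGetD_map_const _ (PySem.Set.empty : PySem.Set Int) j hj]
    simp [PySem.Set.empty]

-- cardinality: a nodup list of ints inside [0,n) has length ≥ n iff it contains all of [0,n)
lemma card_cover (n : Int) (S : List Int) (hnd : S.Nodup)
    (hsub : ∀ x ∈ S, 0 ≤ x ∧ x < n) :
    (n ≤ (S.length : Int)) ↔ ∀ v : Int, 0 ≤ v → v < n → v ∈ S := by
  have hTnd : (PySem.List.pyRange 0 n 1).Nodup := PySem.List.nodup_pyRange_one 0 n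
  have hTlen : (PySem.List.pyRange 0 n 1).length = n.toNat := by
    rw [PySem.List.length_pyRange_one]; omega
  have hcS : S.toFinset.card = S.length := List.toFinset_card_of_nodup hnd
  have hcT : (PySem.List.pyRange 0 n 1).toFinset.card = n.toNat := by
    rw [List.toFinset_card_of_nodup hTnd, hTlen]
  have hsubF : S.toFinset ⊆ (PySem.List.pyRange 0 n 1).toFinset := by
    intro x hx
    rw [List.mem_toFinset] at *
    rcases hsub x hx with ⟨h1, h2⟩
    rw [PySem.List.mem_pyRange_one]; exact ⟨h1, h2⟩
  constructor
  · intro hlen v hv0 hvn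
    have hle : (PySem.List.pyRange 0 n 1).toFinset.card ≤ S.toFinset.card := by omega
    have heq := Finset.eq_of_subset_of_card_le hsubF hle
    have hvT : v ∈ (PySem.List.pyRange 0 n 1).toFinset := by
      rw [List.mem_toFinset, PySem.List.mem_pyRange_one]; exact ⟨hv0, hvn⟩
    rw [← heq, List.mem_toFinset] at hvT
    exact hvT
  · intro hall
    have hTS : (PySem.List.pyRange 0 n 1).toFinset ⊆ S.toFinset := by
      intro x hx
      rw [List.mem_toFinset, PySem.List.mem_pyRange_one] at hx
      rw [List.mem_toFinset]
      exact hall x hx.1 hx.2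
    have := Finset.card_le_card hTS
    omega

-- A's per-city test says: every city is within two hops of `city`
lemma twoHopCheckA_iff (n : Int) (A : List (List Int)) (B : List (PySem.Set Int))
    (hinv : AdjInv n A B) (city : Int) (hc0 : 0 ≤ city) (hc : city < n) :
    twoHopCheckA n A city = true ↔
      ∀ v : Int, 0 ≤ v → v < n →
        (v = city ∨ Nb B city v ∨ ∃ w, Nb B city w ∧ Nb B w v) := by
  obtain ⟨hA, hB, hmem, hrange, hsym⟩ := hinv
  simp only [twoHopCheckA, Bool.not_eq_true', decide_eq_false_iff_not, not_lt, PySem.Set.len_eq]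
  set one : PySem.Set Int := PySem.Set.ofList (PySem.List.pyGetD A city []) with hone
  set two : PySem.Set Int :=
    PySem.Set.ofList (one.flatMap (fun w => PySem.List.pyGetD A w [])) with htwo
  set S : PySem.Set Int := PySem.Set.union (PySem.Set.union (PySem.Set.ofList [city]) one) two with hS
  have hSnd : S.Nodup :=
    PySem.Set.nodup_union _ _ (PySem.Set.nodup_union _ _ (PySem.Set.nodup_ofList [city]))
  have hmemS : ∀ x : Int, x ∈ S ↔
      (x = city ∨ Nb B city x ∨ ∃ w, Nb B city w ∧ Nb B w x) := by
    intro x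
    rw [hS, htwo, hone]
    simp only [PySem.Set.mem_union, PySem.Set.mem_ofList, List.mem_flatMap, List.mem_singleton]
    constructor
    · rintro ((hx | hx) | ⟨w, hw, hxw⟩)
      · exact Or.inl hx
      · exact Or.inr (Or.inl ((hmem city x hc0).mp hx))
      · have hwNb : Nb B city w := (hmem city w hc0).mp hw
        have hw0 : 0 ≤ w := (hrange city w hc0 hwNb).1
        exact Or.inr (Or.inr ⟨w, hwNb, (hmem w x hw0).mp hxw⟩)
    · rintro (hx | hx | ⟨w, hw, hxw⟩)
      · exact Or.inl (Or.inl hx)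
      · exact Or.inl (Or.inr ((hmem city x hc0).mpr hx))
      · have hw0 : 0 ≤ w := (hrange city w hc0 hw).1
        exact Or.inr ⟨w, (hmem city w hc0).mpr hw, (hmem w x hw0).mpr hxw⟩
  have hSsub : ∀ x ∈ S, 0 ≤ x ∧ x < n := by
    intro x hx
    rcases (hmemS x).mp hx with hx | hx | ⟨w, hw, hxw⟩
    · subst hx; exact ⟨hc0, hc⟩
    · have := hrange city x hc0 hx; exact ⟨this.1, this.2.1⟩
    · have hw0 : 0 ≤ w := (hrange city w hc0 hw).1
      have := hrange w x hw0 hxw; exact ⟨this.1, this.2.1⟩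
  rw [card_cover n S hSnd hSsub]
  constructor
  · intro h v hv0 hvn; exact (hmemS v).mp (h v hv0 hvn)
  · intro h v hv0 hvn; exact (hmemS v).mpr (h v hv0 hvn)

-- the pairwise test of B, unfolded to the neighbourhood relation
lemma pairTest_iff (B : List (PySem.Set Int)) (u v : Int) :
    (PySem.Set.contains (PySem.List.pyGetD B u PySem.Set.empty) v ||
      !(PySem.Set.isdisjoint (PySem.List.pyGetD B u PySem.Set.empty)
                             (PySem.List.pyGetD B v PySem.Set.empty))) = true ↔
      Nb B u v ∨ ∃ w, Nb B u w ∧ Nb B v w := by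
  rw [Bool.or_eq_true, PySem.Set.contains_iff, Bool.not_eq_true']
  constructor
  · rintro (h | h)
    · exact Or.inl h
    · have hnd : ¬ (PySem.Set.isdisjoint (PySem.List.pyGetD B u PySem.Set.empty)
          (PySem.List.pyGetD B v PySem.Set.empty) = true) := by rw [h]; exact Bool.false_ne_true
      have := mt (PySem.Set.isdisjoint_iff _ _).mpr hnd
      push Not at this
      obtain ⟨w, hw1, hw2⟩ := this
      exact Or.inr ⟨w, hw1, hw2⟩
  · rintro (h | ⟨w, hw1, hw2⟩)
    · exact Or.inl h
    · refine Or.inr ?_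
      rw [Bool.eq_false_iff]
      intro hcontra
      exact ((PySem.Set.isdisjoint_iff _ _).mp hcontra) w hw1 hw2

theorem solution_eq (n : Int) (roads : List (List Int)) (hpre : Pre_solution n roads) :
    solution n roads = solution_alt n roads := by
  have hinv := AdjInv_build n roads hpre
  obtain ⟨hA, hB, hmem, hrange, hsym⟩ := hinv
  have hinv' : AdjInv n (buildAdjA n roads) (buildAdjB n roads) := ⟨hA, hB, hmem, hrange, hsym⟩
  set A := buildAdjA n roads
  set B := buildAdjB n roads
  rw [Bool.eq_iff_iff]
  simp only [solution, solution_alt, List.all_eq_true]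
  constructor
  · -- A's check implies B's pairwise check
    intro h u hu v hv
    rw [PySem.List.mem_pyRange_one] at hu hv
    rw [pairTest_iff]
    have hu' : u ∈ PySem.List.pyRange 0 (n - 1) 1 := by
      rw [PySem.List.mem_pyRange_one]; omega
    have := (twoHopCheckA_iff n A B hinv' u hu.1 (by omega)).mp (h u hu')
    rcases this v (by omega) hv.2 with hv' | hv' | ⟨w, hw1, hw2⟩
    · omega
    · exact Or.inl hv'
    · have hw0 : 0 ≤ w := (hrange u w hu.1 hw1).1
      exact Or.inr ⟨w, hw1, (hsym w v hw0 (by omega)).mp hw2⟩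
  · -- B's pairwise check implies A's check
    intro h c hc
    rw [PySem.List.mem_pyRange_one] at hc
    rw [twoHopCheckA_iff n A B hinv' c hc.1 (by omega)]
    intro v hv0 hvn
    rcases lt_trichotomy v c with hvc | hvc | hvc
    · -- use the pair (v, c)
      have hv' : v ∈ PySem.List.pyRange 0 n 1 := by rw [PySem.List.mem_pyRange_one]; omega
      have hc' : c ∈ PySem.List.pyRange (v + 1) n 1 := by rw [PySem.List.mem_pyRange_one]; omega
      rcases (pairTest_iff B v c).mp (h v hv' c hc') with h' | ⟨w, hw1, hw2⟩
      · exact Or.inr (Or.inl ((hsym v c hv0 hc.1).mp h'))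
      · have hw0 : 0 ≤ w := (hrange v w hv0 hw1).1
        exact Or.inr (Or.inr ⟨w, hw2, (hsym v w hv0 hw0).mp hw1⟩)
    · exact Or.inl hvc
    · -- use the pair (c, v)
      have hc' : c ∈ PySem.List.pyRange 0 n 1 := by rw [PySem.List.mem_pyRange_one]; omega
      have hv' : v ∈ PySem.List.pyRange (c + 1) n 1 := by rw [PySem.List.mem_pyRange_one]; omega
      rcases (pairTest_iff B c v).mp (h c hc' v hv') with h' | ⟨w, hw1, hw2⟩
      · exact Or.inr (Or.inl h')
      · have hw0 : 0 ≤ w := (hrange c w hc.1 hw1).1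
        exact Or.inr (Or.inr ⟨w, hw1, (hsym w v hw0 hv0).mpr hw2⟩)

-- ===== VERDICT (by name: the statement is the Claim_ definition above) =====
theorem solution_spec : Claim_equal_solution := by
  intro n roads _ hpre
  unfold Spec_solution
  exact solution_eq n roads hpre
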